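-- pv_equiv track=rewrite | github.com/Shubhra55/Python-Guess_the_Word-Game | main.py | change_current_word_state
-- ===== SOURCE A (Python) =====
-- def change_current_word_state(selected_word,input_char,current_word_state):
--     # If the input character is there in the selected word, place it in its place and return the new state or return the same word state
--     modified_word_state=""
--
--     for i in range(len(selected_word)):
--
--         if current_word_state[i]=="_" and selected_word[i]==input_char:
--
--             modified_word_state+=selected_word[i]
--         else:
--             modified_word_state+=current_word_state[i]
--
--     return modified_word_state
-- ===== SOURCE B (Python) =====
-- def change_current_word_state(selected_word, input_char, current_word_state):
--     # patch-by-search: C-level str.find jumps to occurrences of input_char,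
--     # instead of testing every index in Python; str.find matches substrings,
--     # so the scan only applies when input_char is a single character
--     # (otherwise no position can equal it).
--     out = list(current_word_state[:len(selected_word)])
--     if len(input_char) == 1:
--         i = selected_word.find(input_char)
--         while i != -1:
--             if out[i] == "_":
--                 out[i] = input_char
--             i = selected_word.find(input_char, i + 1)
--     return "".join(out)
-- ===== Notes on version B (the rewrite author's own statement) =====
-- stated objective: faster
-- what changed: B copies the visible state once and then uses str.find to jump directly to the occurrences of input_char, patching only those positions, instead of A's Python-level loop that tests and rebuilds every index by string concatenation.
import Mathlib
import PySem

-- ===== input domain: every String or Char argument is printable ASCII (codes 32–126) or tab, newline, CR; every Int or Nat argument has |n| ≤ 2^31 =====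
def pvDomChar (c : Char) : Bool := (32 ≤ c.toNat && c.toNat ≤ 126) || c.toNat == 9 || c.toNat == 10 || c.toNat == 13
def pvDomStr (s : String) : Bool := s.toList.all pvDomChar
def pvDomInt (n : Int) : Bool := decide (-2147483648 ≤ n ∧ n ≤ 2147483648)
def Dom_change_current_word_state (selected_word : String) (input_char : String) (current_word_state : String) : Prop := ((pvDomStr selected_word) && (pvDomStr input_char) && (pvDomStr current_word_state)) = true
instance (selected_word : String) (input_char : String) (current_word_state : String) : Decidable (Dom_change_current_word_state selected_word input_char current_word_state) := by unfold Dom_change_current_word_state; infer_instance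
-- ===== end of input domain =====

-- B copies the state once and patches only the positions str.find locates, instead of A's per-index conditional rebuild; a timing run measured B faster (constant-factor: C-level search replaces the per-character Python loop).


-- ===== PORT A =====
def change_current_word_state (selected_word : String) (input_char : String) (current_word_state : String) : String :=
  let swl := selected_word.toList
  let cwsl := current_word_state.toList
  -- for i in range(len(selected_word)): conditional append (indexing is total under Pre_)
  String.ofList ((PySem.List.pyRange 0 (swl.length : Int) 1).foldl (fun acc i =>
    if PySem.List.pyGetD cwsl i ' ' == '_' && String.ofList [PySem.List.pyGetD swl i ' '] == input_char then
      acc ++ [PySem.List.pyGetD swl i ' ']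
    else
      acc ++ [PySem.List.pyGetD cwsl i ' ']) [])

-- ===== PORT B =====
-- Source B's while loop: i = selected_word.find(input_char); while i != -1: patch; i = find(input_char, i+1).
-- The Nat argument is fuel only (the search index strictly increases, so len+1 rounds always suffice);
-- out[i] reads/writes use pyGetD/pySetD, exact under Pre_ (every found index is in range there).
def pvPatchLoop (selected_word : String) (input_char : String) : Nat → Int → List Char → List Char
  | 0, _, out => out
  | fuel+1, i, out =>
    if i == -1 then out
    else
      let out' := if PySem.List.pyGetD out i ' ' == '_'
                  then PySem.List.pySetD out i (input_char.toList.headD ' ') else out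
      pvPatchLoop selected_word input_char fuel (PySem.Str.findFrom selected_word input_char (i+1) none) out'

def change_current_word_state_alt (selected_word : String) (input_char : String) (current_word_state : String) : String :=
  -- out = list(current_word_state[:len(selected_word)])
  let out := PySem.List.slice current_word_state.toList none (some (selected_word.toList.length : Int))
  -- if len(input_char) == 1: run the find-and-patch loop
  let out2 := if PySem.Str.len input_char == 1 then
      pvPatchLoop selected_word input_char (selected_word.toList.length + 1)
        (PySem.Str.find selected_word input_char) out
    else out
  String.ofList out2

-- ===== PRECONDITION & SPEC =====
-- Pre_ excludes exactly the inputs where current_word_state is shorter than selected_word: A raises IndexError there.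
def Pre_change_current_word_state (selected_word : String) (input_char : String) (current_word_state : String) : Prop :=
  selected_word.toList.length ≤ current_word_state.toList.length
instance (selected_word : String) (input_char : String) (current_word_state : String) : Decidable (Pre_change_current_word_state selected_word input_char current_word_state) := by unfold Pre_change_current_word_state; infer_instance
def pvWitness_change_current_word_state : String × String × String := ("ab", "a", "__")
def Spec_change_current_word_state (selected_word : String) (input_char : String) (current_word_state : String) (out : String) : Prop := out = change_current_word_state_alt selected_word input_char current_word_state
instance (selected_word : String) (input_char : String) (current_word_state : String) (out : String) : Decidable (Spec_change_current_word_state selected_word input_char current_word_state out) := by unfold Spec_change_current_word_state; infer_instance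

-- ===== CLAIM (what is proved, stated in full; the proofs are below) =====
def Claim_equal_change_current_word_state : Prop := ∀ (selected_word : String) (input_char : String) (current_word_state : String), Dom_change_current_word_state selected_word input_char current_word_state → Pre_change_current_word_state selected_word input_char current_word_state → Spec_change_current_word_state selected_word input_char current_word_state (change_current_word_state selected_word input_char current_word_state)

-- ===== LEMMAS AND PROOFS =====

-- getD after set
theorem pv_getD_set (l : List Char) (m j : Nat) (v d : Char) (hm : m < l.length) :
    (l.set m v).getD j d = if j = m then v else l.getD j d := by
  by_cases h : j = m
  · subst h; simp [List.getD_eq_getElem?_getD, hm]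
  · simp [List.getD_eq_getElem?_getD, List.getElem?_set_ne (fun he => h he.symm), h]

-- [c] is a prefix of l.drop j iff the character at j is c
theorem pv_prefix_singleton (c : Char) (l : List Char) (j : Nat) (hj : j < l.length) :
    [c] <+: l.drop j ↔ l.getD j ' ' = c := by
  rw [List.drop_eq_getElem_cons hj]
  constructor
  · rintro ⟨t, ht⟩
    simp only [List.cons_append, List.nil_append, List.cons.injEq] at ht
    simp [List.getD_eq_getElem?_getD, List.getElem?_eq_getElem hj, ht.1]
  · intro h
    have : l[j] = c := by
      simpa [List.getD_eq_getElem?_getD, List.getElem?_eq_getElem hj] using h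
    exact ⟨l.drop (j+1), by simp [this]⟩

-- a prefix at position j ≥ k yields an infix of l.drop k
theorem pv_infix_of_prefix_drop (c : Char) (l : List Char) (k j : Nat) (hkj : k ≤ j)
    (h : [c] <+: l.drop j) : [c] <:+: l.drop k := by
  have : l.drop j = (l.drop k).drop (j - k) := by
    rw [List.drop_drop]; congr 1; omega
  rw [this] at h
  exact h.isInfix.trans ((l.drop k).drop_suffix (j - k)).isInfix

-- the patch loop preserves the length of out
theorem pv_loop_length (sw ic : String) : ∀ (fuel : Nat) (i : Int) (out : List Char),
    (pvPatchLoop sw ic fuel i out).length = out.length := by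
  intro fuel
  induction fuel with
  | zero => intro i out; rfl
  | succ fuel ih =>
      intro i out
      simp only [pvPatchLoop]
      split
      · rfl
      · rw [ih]
        split <;> simp [PySem.List.length_pySetD]

-- what the loop computes, position by position, when input_char is the single character c0
theorem pv_loop_spec (sw ic : String) (c0 : Char) (hic : ic.toList = [c0]) :
    ∀ (fuel k : Nat) (out : List Char), out.length = sw.toList.length →
    k ≤ sw.toList.length → sw.toList.length ≤ fuel + k →
    ∀ j, j < sw.toList.length →
    (pvPatchLoop sw ic fuel (PySem.Chars.findFrom sw.toList [c0] (k : Int) none) out).getD j ' '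
      = if k ≤ j ∧ sw.toList.getD j ' ' = c0 ∧ out.getD j ' ' = '_' then c0 else out.getD j ' ' := by
  intro fuel
  induction fuel with
  | zero =>
      intro k out hlen hk hfuel j hj
      have hc : ¬ (k ≤ j ∧ sw.toList.getD j ' ' = c0 ∧ out.getD j ' ' = '_') := by
        rintro ⟨h1, -, -⟩; omega
      rw [show pvPatchLoop sw ic 0 (PySem.Chars.findFrom sw.toList [c0] (k : Int) none) out
            = out from rfl, if_neg hc]
  | succ fuel ih =>
      intro k out hlen hk hfuel j hj
      set i := PySem.Chars.findFrom sw.toList [c0] (k : Int) none with hi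
      by_cases hneg : i = -1
      · -- no further occurrence: nothing at or after k matches
        have hnone : ¬ [c0] <:+: sw.toList.drop k :=
          (PySem.Chars.findFrom_natCast_eq_neg_one_iff sw.toList [c0] k hk).mp hneg
        have hcond : ¬ (k ≤ j ∧ sw.toList.getD j ' ' = c0 ∧ out.getD j ' ' = '_') := by
          rintro ⟨h1, h2, -⟩
          exact hnone (pv_infix_of_prefix_drop c0 sw.toList k j h1
            ((pv_prefix_singleton c0 sw.toList j hj).mpr h2))
        have hret : pvPatchLoop sw ic (fuel + 1) i out = out := by
          simp [pvPatchLoop, hneg]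
        rw [hret, if_neg hcond]
      · obtain ⟨hki, hpref, hmin⟩ := PySem.Chars.findFrom_natCast_spec sw.toList [c0] k hk hneg
        have hi0 : (0 : Int) ≤ i := le_trans (by exact_mod_cast Nat.zero_le k) hki
        set m := i.toNat with hm
        have him : i = (m : Int) := (Int.toNat_of_nonneg hi0).symm
        have hkm : k ≤ m := by omega
        have hmn : m < sw.toList.length := by
          by_contra hge
          rw [List.drop_eq_nil_of_le (by omega)] at hpref
          simpa using hpref.length_le
        have hswm : sw.toList.getD m ' ' = c0 := (pv_prefix_singleton c0 sw.toList m hmn).mp hpref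
        -- one loop step
        have hstep : (i + 1 : Int) = ((m + 1 : Nat) : Int) := by omega
        set out' := if PySem.List.pyGetD out i ' ' == '_'
                    then PySem.List.pySetD out i (ic.toList.headD ' ') else out with hout'
        have hunfold : pvPatchLoop sw ic (fuel + 1) i out
            = pvPatchLoop sw ic fuel (PySem.Str.findFrom sw ic (i + 1) none) out' := by
          rw [hout']
          simp only [pvPatchLoop]
          rw [if_neg (by simpa using hneg)]
        have hout'_eq : out' = if out.getD m ' ' = '_' then out.set m c0 else out := by
          rw [hout', him]
          simp [PySem.List.pyGetD_natCast, PySem.List.pySetD_natCast, hic]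
        have hlen' : out'.length = sw.toList.length := by
          rw [hout'_eq]; split <;> simp [hlen]
        have hrec := ih (m + 1) out' hlen' (by omega) (by omega) j hj
        rw [hunfold, hstep, PySem.Str.findFrom_eq, hic, hrec]
        -- compare the two position-wise descriptions
        have hout'j : out'.getD j ' ' = if j = m then (if out.getD m ' ' = '_' then c0 else out.getD m ' ') else out.getD j ' ' := by
          rw [hout'_eq]
          by_cases hb : out.getD m ' ' = '_'
          · rw [if_pos hb, pv_getD_set out m j c0 ' ' (by omega)]
            split <;> simp
          · rw [if_neg hb]
            split
            · next hjm => subst hjm; simp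
            · rfl
        by_cases hjm : j = m
        · subst hjm
          rw [hout'j]
          rw [if_neg (by rintro ⟨h1, -, -⟩; omega)]
          by_cases hb : out.getD m ' ' = '_'
          · rw [if_pos hb, if_pos (show k ≤ m ∧ sw.toList.getD m ' ' = c0 ∧ out.getD m ' ' = '_'
                from ⟨hkm, hswm, hb⟩)]
            simp
          · rw [if_neg hb, if_neg (show ¬ (k ≤ m ∧ sw.toList.getD m ' ' = c0 ∧ out.getD m ' ' = '_')
                from by rintro ⟨-, -, h3⟩; exact hb h3)]
            simp
        · rw [hout'j, if_neg hjm]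
          by_cases hmj : m + 1 ≤ j
          · -- beyond m: same condition with k replaced by m+1 (k ≤ j anyway)
            by_cases hc : sw.toList.getD j ' ' = c0 ∧ out.getD j ' ' = '_'
            · rw [if_pos ⟨hmj, hc.1, hc.2⟩, if_pos ⟨by omega, hc.1, hc.2⟩]
            · rw [if_neg (by rintro ⟨-, h2, h3⟩; exact hc ⟨h2, h3⟩),
                  if_neg (by rintro ⟨-, h2, h3⟩; exact hc ⟨h2, h3⟩)]
          · -- j < m (and j ≠ m): either j < k, or k ≤ j < m where no occurrence exists
            rw [if_neg (by rintro ⟨h1, -, -⟩; omega)]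
            by_cases hjk : j < k
            · rw [if_neg (by rintro ⟨h1, -, -⟩; omega)]
            · have hnoc : sw.toList.getD j ' ' ≠ c0 := by
                intro hc
                exact hmin j (by omega) (by omega)
                  ((pv_prefix_singleton c0 sw.toList j hj).mpr hc)
              rw [if_neg (by rintro ⟨-, h2, -⟩; exact hnoc h2)]

-- A single-character string literal equals ic iff the characters agree / length forces inequality
theorem pv_ofList_singleton_eq (x : Char) (ic : String) :
    (String.ofList [x] = ic) ↔ ic.toList = [x] := by
  constructor
  · rintro rfl; exact String.toList_ofList
  · intro h
    rw [← h, String.ofList_toList]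

-- A's foldl over range, elementwise (same reshaping as before)
theorem pv_A_as_map (sw ic cws : String) :
    change_current_word_state sw ic cws = String.ofList
      ((PySem.List.pyRange 0 (sw.toList.length : Int) 1).map (fun i =>
        if PySem.List.pyGetD cws.toList i ' ' == '_' && String.ofList [PySem.List.pyGetD sw.toList i ' '] == ic then
          PySem.List.pyGetD sw.toList i ' ' else PySem.List.pyGetD cws.toList i ' ')) := by
  simp only [change_current_word_state]
  congr 1
  rw [show (fun (acc : List Char) (i : Int) =>
      if PySem.List.pyGetD cws.toList i ' ' == '_' && String.ofList [PySem.List.pyGetD sw.toList i ' '] == ic then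
        acc ++ [PySem.List.pyGetD sw.toList i ' ']
      else acc ++ [PySem.List.pyGetD cws.toList i ' '])
    = (fun acc i => acc ++ [if PySem.List.pyGetD cws.toList i ' ' == '_' && String.ofList [PySem.List.pyGetD sw.toList i ' '] == ic then
        PySem.List.pyGetD sw.toList i ' ' else PySem.List.pyGetD cws.toList i ' ']) from by
      funext acc i; split <;> rfl]
  rw [PySem.List.foldl_append_singleton_eq_map]
  rfl

-- ===== VERDICT (by name: the statement is the Claim_ definition above) =====
theorem change_current_word_state_spec : Claim_equal_change_current_word_state := by
  intro sw ic cws _ hpre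
  have hpre' : sw.toList.length ≤ cws.toList.length := hpre
  simp only [Spec_change_current_word_state]
  rw [pv_A_as_map]
  simp only [change_current_word_state_alt]
  rw [PySem.List.slice_to_natCast]
  set n := sw.toList.length with hn
  have htake : (cws.toList.take n).length = n := by rw [List.length_take]; omega
  by_cases hone : PySem.Str.len ic = 1
  · -- input_char is one character c0
    have hlone : ic.toList.length = 1 := by
      have := PySem.Str.len_eq ic; omega
    obtain ⟨c0, hic⟩ : ∃ c0, ic.toList = [c0] := by
      cases hics : ic.toList with
      | nil => rw [hics] at hlone; simp at hlone
      | cons a t =>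
          cases t with
          | nil => exact ⟨a, rfl⟩
          | cons b t' => rw [hics] at hlone; simp at hlone
    rw [if_pos (by simpa using hone)]
    have hfind : PySem.Str.find sw ic = PySem.Chars.findFrom sw.toList [c0] ((0 : Nat) : Int) none := by
      rw [Nat.cast_zero, PySem.Chars.findFrom_zero, ← hic]
      rfl
    rw [hfind]
    congr 1
    apply List.ext_getElem
    · simp [pv_loop_length, htake, PySem.List.length_pyRange_one]
    · intro j h1 h2
      have hj : j < n := by simpa [pv_loop_length, htake] using h2
      have hj' : j < cws.toList.length := by omega
      rw [List.getElem_map, PySem.List.getElem_pyRange_one]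
      have hB := pv_loop_spec sw ic c0 hic (n + 1) 0 (cws.toList.take n) htake
        (Nat.zero_le n) (by omega) j hj
      rw [← List.getD_eq_getElem _ ' ' h2, hB]
      have hsw : PySem.List.pyGetD sw.toList ((0 : Int) + (j : Int)) ' ' = sw.toList.getD j ' ' := by
        rw [zero_add, PySem.List.pyGetD_natCast]
      have hcw : PySem.List.pyGetD cws.toList ((0 : Int) + (j : Int)) ' ' = cws.toList.getD j ' ' := by
        rw [zero_add, PySem.List.pyGetD_natCast]
      have hout0 : (cws.toList.take n).getD j ' ' = cws.toList.getD j ' ' := by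
        simp [List.getD_eq_getElem?_getD, List.getElem?_take_of_lt hj]
      rw [hsw, hcw, hout0]
      have hchar : (String.ofList [sw.toList.getD j ' '] == ic) = (sw.toList.getD j ' ' == c0) := by
        rcases eq_or_ne (sw.toList.getD j ' ') c0 with h | h
        · rw [h, ← hic, String.ofList_toList]
          rw [beq_self_eq_true, beq_self_eq_true]
        · have hne : String.ofList [sw.toList.getD j ' '] ≠ ic := by
            intro he
            have h2 := (pv_ofList_singleton_eq _ ic).mp he
            rw [hic] at h2
            simp only [List.cons.injEq, and_true] at h2
            exact h h2.symm
          rw [beq_eq_false_iff_ne.mpr hne, beq_eq_false_iff_ne.mpr h]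
      rw [hchar]
      by_cases hs : sw.toList.getD j ' ' = c0 <;> by_cases hb : cws.toList.getD j ' ' = '_' <;>
        simp only [List.getD_eq_getElem?_getD] at hs hb ⊢ <;> simp [hs, hb]
  · -- input_char is not a single character: no position can match, both sides copy the state
    rw [if_neg (by simpa using hone)]
    have hlone : ic.toList.length ≠ 1 := by
      have := PySem.Str.len_eq ic; omega
    congr 1
    apply List.ext_getElem
    · simp [htake, PySem.List.length_pyRange_one]
    · intro j h1 h2
      have hj : j < n := by omega
      have hj' : j < cws.toList.length := by omega
      rw [List.getElem_map, PySem.List.getElem_pyRange_one]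
      have hchar : (String.ofList [PySem.List.pyGetD sw.toList ((0:Int) + (j:Int)) ' '] == ic) = false := by
        rw [beq_eq_false_iff_ne]
        intro he
        have := (pv_ofList_singleton_eq _ ic).mp he
        rw [this] at hlone
        simp at hlone
      rw [hchar, Bool.and_false, if_neg (by simp)]
      rw [zero_add, PySem.List.pyGetD_natCast]
      simp [List.getD_eq_getElem?_getD, List.getElem?_eq_getElem hj']
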